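-- pv_equiv track=rewrite | github.com/dabyeol/problem-solving | posts/solutions/programmers/181893/code.py | solution
-- ===== SOURCE A (Python) =====
-- def solution(arr, query):
--     answer = arr[:]
--     for i, q in enumerate(query):
--         if i % 2 == 0:
--             answer = answer[: q + 1]
--         else:
--             answer = answer[q:]
--
--     return answer
-- ===== SOURCE B (Python) =====
-- def solution(arr, query):
--     # Track window bounds (lo, hi) over arr and do a single final slice.
--     lo, hi = 0, len(arr)
--     for i, q in enumerate(query):
--         n = hi - lo
--         if i % 2 == 0:
--             stop = q + 1
--             if stop < 0:
--                 stop += n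
--             hi = lo + min(max(stop, 0), n)
--         else:
--             start = q
--             if start < 0:
--                 start += n
--             lo = lo + min(max(start, 0), n)
--     return arr[lo:hi]
-- ===== Notes on version B (the rewrite author's own statement) =====
-- stated objective: alternative
-- what changed: Instead of materialising a new list copy per query, B tracks the window bounds lo/hi arithmetically (replicating Python slice clamping) and performs one final slice.
import Mathlib
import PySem

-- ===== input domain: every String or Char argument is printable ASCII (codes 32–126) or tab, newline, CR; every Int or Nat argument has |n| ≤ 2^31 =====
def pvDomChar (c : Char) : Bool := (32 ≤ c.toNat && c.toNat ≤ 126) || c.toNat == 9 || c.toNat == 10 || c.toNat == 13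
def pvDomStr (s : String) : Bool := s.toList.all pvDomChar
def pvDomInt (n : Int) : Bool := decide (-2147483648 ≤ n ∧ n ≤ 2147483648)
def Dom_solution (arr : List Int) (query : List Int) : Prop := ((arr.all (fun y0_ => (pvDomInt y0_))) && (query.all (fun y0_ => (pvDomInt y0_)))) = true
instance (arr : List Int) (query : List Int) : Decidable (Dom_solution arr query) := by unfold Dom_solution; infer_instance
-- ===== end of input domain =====

-- B replaces A's per-query list re-slicing by arithmetic tracking of the window bounds
-- lo/hi plus one final slice (objective: alternative algorithm, same proven behaviour).

-- ===== PORT A =====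
-- one loop step of A: even index → answer[:q+1], odd index → answer[q:]
def stepA (answer : List Int) (iq : Int × Int) : List Int :=
  if PySem.Int.mod iq.1 2 = 0 then
    PySem.List.slice answer none (some (iq.2 + 1))
  else
    PySem.List.slice answer (some iq.2) none

def solution (arr : List Int) (query : List Int) : List Int :=
  (PySem.List.enumerate query).foldl stepA arr

-- ===== PORT B =====
-- one loop step of B: update (lo, hi) by the clamped slice bound
def stepB (lohi : Int × Int) (iq : Int × Int) : Int × Int :=
  let n := lohi.2 - lohi.1
  if PySem.Int.mod iq.1 2 = 0 then
    let stop := iq.2 + 1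
    let stop := if stop < 0 then stop + n else stop
    (lohi.1, lohi.1 + min (max stop 0) n)
  else
    let start := iq.2
    let start := if start < 0 then start + n else start
    (lohi.1 + min (max start 0) n, lohi.2)

def solution_alt (arr : List Int) (query : List Int) : List Int :=
  let p := (PySem.List.enumerate query).foldl stepB ((0 : Int), (arr.length : Int))
  PySem.List.slice arr (some p.1) (some p.2)

-- ===== PRECONDITION & SPEC =====
def Spec_solution (arr : List Int) (query : List Int) (out : List Int) : Prop := out = solution_alt arr query
instance (arr : List Int) (query : List Int) (out : List Int) : Decidable (Spec_solution arr query out) := by unfold Spec_solution; infer_instance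

-- ===== CLAIM (what is proved, stated in full; the proofs are below) =====
def Claim_equal_solution : Prop := ∀ (arr : List Int) (query : List Int), Dom_solution arr query → Spec_solution arr query (solution arr query)

-- ===== LEMMAS AND PROOFS =====

-- B's clamp arithmetic computes exactly Python's slice-index normalisation clampIdx
lemma clamp_eq (L : Nat) (t : Int) :
    ((PySem.List.clampIdx L t : Nat) : Int) = min (max (if t < 0 then t + L else t) 0) L := by
  unfold PySem.List.clampIdx
  split_ifs <;> omega

lemma clampIdx_le' (L : Nat) (t : Int) : PySem.List.clampIdx L t ≤ L := by
  unfold PySem.List.clampIdx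
  split_ifs <;> omega

-- A's slice of the current window equals the same window with a clamped bound update
lemma sliceA_to (cur : List Int) (t : Int) :
    PySem.List.slice cur none (some t) = cur.take (PySem.List.clampIdx cur.length t) := by
  simp [PySem.List.slice]

-- main invariant: running A's fold on the window (arr.drop lo).take (hi-lo) gives the
-- window described by B's fold of the bounds, which stay within [lo, hi]
lemma loop_eq (query : List Int) (s : Int) (arr : List Int) (lo hi : Nat)
    (h1 : lo ≤ hi) (h2 : hi ≤ arr.length) :
    (PySem.List.enumerate query s).foldl stepA ((arr.drop lo).take (hi - lo))
      = (fun p : Int × Int => (arr.drop p.1.toNat).take (p.2.toNat - p.1.toNat))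
          ((PySem.List.enumerate query s).foldl stepB ((lo : Int), (hi : Int)))
    ∧ (lo : Int) ≤ ((PySem.List.enumerate query s).foldl stepB ((lo : Int), (hi : Int))).1
    ∧ ((PySem.List.enumerate query s).foldl stepB ((lo : Int), (hi : Int))).1
        ≤ ((PySem.List.enumerate query s).foldl stepB ((lo : Int), (hi : Int))).2
    ∧ ((PySem.List.enumerate query s).foldl stepB ((lo : Int), (hi : Int))).2 ≤ (hi : Int) := by
  induction query generalizing s lo hi with
  | nil =>
      simp only [PySem.List.enumerate_nil, List.foldl_nil]
      refine ⟨by simp, le_refl _, by exact_mod_cast h1, le_refl _⟩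
  | cons q rest ih =>
      rw [PySem.List.enumerate_cons, List.foldl_cons, List.foldl_cons]
      have hlen : ((arr.drop lo).take (hi - lo)).length = hi - lo := by
        simp; omega
      by_cases hpar : PySem.Int.mod s 2 = 0
      · -- even step: answer = answer[:q+1]
        set k := PySem.List.clampIdx (hi - lo) (q + 1) with hk
        have hkle : k ≤ hi - lo := clampIdx_le' _ _
        have hcast : ((hi - lo : Nat) : Int) = (hi : Int) - (lo : Int) := by omega
        have hA : stepA ((arr.drop lo).take (hi - lo)) (s, q)
            = (arr.drop lo).take ((lo + k) - lo) := by
          simp only [stepA]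
          rw [if_pos hpar]
          rw [sliceA_to, hlen, List.take_take, ← hk]
          congr 1
          omega
        have hB : stepB ((lo : Int), (hi : Int)) (s, q)
            = ((lo : Int), ((lo + k : Nat) : Int)) := by
          simp only [stepB]
          rw [if_pos hpar]
          have hc := clamp_eq (hi - lo) (q + 1)
          rw [Prod.mk.injEq]
          refine ⟨rfl, ?_⟩
          push_cast
          rw [← hcast, ← hc, ← hk]
        rw [hA, hB]
        have := ih (s + 1) lo (lo + k) (by omega) (by omega)
        refine ⟨this.1, this.2.1, this.2.2.1,
          this.2.2.2.trans (by exact_mod_cast (by omega : lo + k ≤ hi))⟩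
      · -- odd step: answer = answer[q:]
        set k := PySem.List.clampIdx (hi - lo) q with hk
        have hkle : k ≤ hi - lo := clampIdx_le' _ _
        have hcast : ((hi - lo : Nat) : Int) = (hi : Int) - (lo : Int) := by omega
        have hA : stepA ((arr.drop lo).take (hi - lo)) (s, q)
            = (arr.drop (lo + k)).take (hi - (lo + k)) := by
          simp only [stepA]
          rw [if_neg hpar]
          rw [PySem.List.slice_some_none, hlen, ← hk, List.drop_take, List.drop_drop]
          congr 1
          omega
        have hB : stepB ((lo : Int), (hi : Int)) (s, q)
            = (((lo + k : Nat) : Int), (hi : Int)) := by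
          simp only [stepB]
          rw [if_neg hpar]
          have hc := clamp_eq (hi - lo) q
          rw [Prod.mk.injEq]
          refine ⟨?_, rfl⟩
          push_cast
          rw [← hcast, ← hc, ← hk]
        rw [hA, hB]
        have := ih (s + 1) (lo + k) hi (by omega) h2
        exact ⟨this.1, ((by exact_mod_cast (by omega : lo ≤ lo + k)) : (lo : Int) ≤ ((lo + k : Nat) : Int)).trans this.2.1,
          this.2.2.1, this.2.2.2⟩

-- ===== VERDICT (by name: the statement is the Claim_ definition above) =====
theorem solution_spec : Claim_equal_solution := by
  intro arr query _
  unfold Spec_solution solution solution_alt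
  have h := loop_eq query 0 arr 0 arr.length (Nat.zero_le _) le_rfl
  simp only [List.drop_zero, Nat.sub_zero, List.take_length, Nat.cast_zero] at h
  rw [h.1, PySem.List.slice_toNat arr h.2.1 (h.2.1.trans h.2.2.1)]
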